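-- pv_equiv track=rewrite | github.com/esungul/UniveralValidator | modules/order_filter.py | group_by_msisdn
-- ===== SOURCE A (Python) =====
-- from typing import List, Dict, Any, Optional
--
-- def group_by_msisdn(orders: List[Dict[str, Any]]) -> Dict[str, Any]:
--     """
--     EXISTING METHOD: Group orders by MSISDN, keep latest
--     """
--     grouped = {}
--
--     for order in orders:
--         msisdn = order.get("PR_MSISDN__c")
--
--         if not msisdn:
--             continue
--
--         # Keep the latest order for each MSISDN
--         if msisdn not in grouped:
--             grouped[msisdn] = order
--         else:
--             existing_date = grouped[msisdn].get("CreatedDate", "")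
--             new_date = order.get("CreatedDate", "")
--
--             if new_date > existing_date:
--                 grouped[msisdn] = order
--
--     return grouped
-- ===== SOURCE B (Python) =====
-- def group_by_msisdn(orders):
--     # Group-then-reduce: bucket orders per MSISDN, then take the max by CreatedDate.
--     groups = {}
--     for order in orders:
--         msisdn = order.get("PR_MSISDN__c")
--         if msisdn:
--             groups.setdefault(msisdn, []).append(order)
--     return {m: max(lst, key=lambda o: o.get("CreatedDate", ""))
--             for m, lst in groups.items()}
-- ===== Notes on version B (the rewrite author's own statement) =====
-- stated objective: alternative
-- what changed: Replaces A's inline running-max update of the result dict with a two-pass group-then-reduce: first bucket orders into a dict of lists per MSISDN, then map each bucket to max(bucket, key=CreatedDate), whose first-maximal tie-breaking matches A's strict '>' comparison.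
import Mathlib
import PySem

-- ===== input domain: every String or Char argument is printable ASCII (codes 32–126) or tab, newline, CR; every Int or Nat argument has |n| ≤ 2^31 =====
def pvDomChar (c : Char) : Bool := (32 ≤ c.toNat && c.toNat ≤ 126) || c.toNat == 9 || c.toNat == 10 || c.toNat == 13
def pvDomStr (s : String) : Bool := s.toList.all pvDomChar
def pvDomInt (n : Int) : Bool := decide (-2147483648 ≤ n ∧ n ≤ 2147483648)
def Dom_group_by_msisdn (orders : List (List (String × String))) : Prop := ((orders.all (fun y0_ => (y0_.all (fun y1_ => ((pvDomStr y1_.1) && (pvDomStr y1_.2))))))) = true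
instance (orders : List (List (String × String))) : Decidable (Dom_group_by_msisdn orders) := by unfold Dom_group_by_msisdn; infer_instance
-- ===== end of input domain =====

-- B replaces A's inline running-max update of the result dict with a two-pass
-- group-then-reduce (bucket per MSISDN, then max by CreatedDate); same cost, alternative structure.


-- ===== PORT A =====
-- one iteration of A's loop: falsy MSISDN skipped, first insertion kept, later
-- orders replace the stored one only on a strictly greater CreatedDate
def stepA (grouped : PySem.Dict String (List (String × String))) (order : List (String × String)) :
    PySem.Dict String (List (String × String)) :=
  match (PySem.Dict.mk order).get? "PR_MSISDN__c" with
  | none => grouped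
  | some msisdn =>
    if msisdn = "" then grouped
    else if grouped.contains msisdn = false then grouped.insert msisdn order
    else
      let existing_date := (PySem.Dict.mk (grouped.getD msisdn [])).getD "CreatedDate" ""
      let new_date := (PySem.Dict.mk order).getD "CreatedDate" ""
      if existing_date < new_date then grouped.insert msisdn order else grouped

def group_by_msisdn (orders : List (List (String × String))) : List (String × List (String × String)) :=
  (orders.foldl stepA PySem.Dict.empty).items

-- ===== PORT B =====
-- key used by B's max(): o.get("CreatedDate", "")
def bKey (order : List (String × String)) : String := (PySem.Dict.mk order).getD "CreatedDate" ""

-- one iteration of B's first pass: bucket the order under its MSISDN (setdefault + append)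
def stepB (g : PySem.Dict String (List (List (String × String)))) (order : List (String × String)) :
    PySem.Dict String (List (List (String × String))) :=
  match (PySem.Dict.mk order).get? "PR_MSISDN__c" with
  | none => g
  | some msisdn =>
    if msisdn = "" then g
    else g.modify msisdn [] (· ++ [order])

def group_by_msisdn_alt (orders : List (List (String × String))) : List (String × List (String × String)) :=
  ((orders.foldl stepB PySem.Dict.empty).items).map (fun p => (p.1, PySem.List.maxD p.2 bKey []))

-- ===== PRECONDITION & SPEC =====
def Spec_group_by_msisdn (orders : List (List (String × String))) (out : List (String × List (String × String))) : Prop := out = group_by_msisdn_alt orders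
instance (orders : List (List (String × String))) (out : List (String × List (String × String))) : Decidable (Spec_group_by_msisdn orders out) := by unfold Spec_group_by_msisdn; infer_instance

-- ===== CLAIM (what is proved, stated in full; the proofs are below) =====
def Claim_equal_group_by_msisdn : Prop := ∀ (orders : List (List (String × String))), Dom_group_by_msisdn orders → Spec_group_by_msisdn orders (group_by_msisdn orders)

-- ===== LEMMAS AND PROOFS =====

-- Python max(xs, key) as a running strict-max over the tail
theorem max?_cons {α κ : Type} [LT κ] [DecidableLT κ] (key : α → κ) (x : α) (t : List α) :
    PySem.List.max? (x :: t) key = some (t.foldl (fun b y => if key b < key y then y else b) x) := by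
  induction t generalizing x with
  | nil => rfl
  | cons y t ih =>
      simp only [PySem.List.max?, List.foldl_cons] at ih ⊢
      by_cases h : key x < key y <;> simp [h, ih]

theorem maxD_cons {α κ : Type} [LT κ] [DecidableLT κ] (key : α → κ) (x : α) (t : List α) (d : α) :
    PySem.List.maxD (x :: t) key d = t.foldl (fun b y => if key b < key y then y else b) x := by
  simp [PySem.List.maxD, max?_cons]

-- appending one element to a nonempty list updates its max exactly like A's comparison
theorem maxD_snoc {α κ : Type} [LT κ] [DecidableLT κ] (key : α → κ) (lst : List α) (o d : α)
    (h : lst ≠ []) :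
    PySem.List.maxD (lst ++ [o]) key d =
      if key (PySem.List.maxD lst key d) < key o then o else PySem.List.maxD lst key d := by
  cases lst with
  | nil => exact absurd rfl h
  | cons x t =>
      rw [List.cons_append, maxD_cons, maxD_cons, List.foldl_append]
      simp [List.foldl]

-- with unique keys, a key determines its value in the items list
theorem items_value_unique {κ ν : Type} [BEq κ] [LawfulBEq κ] (d : PySem.Dict κ ν)
    (h : d.keys.Nodup) {k : κ} {v w : ν} (h1 : (k, v) ∈ d.items) (h2 : (k, w) ∈ d.items) : v = w := by
  have e1 := PySem.Dict.get?_of_mem_items d h1 h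
  have e2 := PySem.Dict.get?_of_mem_items d h2 h
  rw [e1] at e2
  exact Option.some.inj e2

-- the projection relating B's buckets to A's stored orders
def projMax (p : String × List (List (String × String))) : String × List (String × String) :=
  (p.1, PySem.List.maxD p.2 bKey [])

-- loop invariant: A's dict is the image of B's bucket dict under projMax
theorem loop_eq : ∀ (orders : List (List (String × String)))
    (gA : PySem.Dict String (List (String × String)))
    (gB : PySem.Dict String (List (List (String × String)))),
    gB.keys.Nodup →
    gA.items = gB.items.map projMax →
    (∀ p ∈ gB.items, p.2 ≠ []) →
    (orders.foldl stepA gA).items = ((orders.foldl stepB gB).items).map projMax := by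
  intro orders
  induction orders with
  | nil => intro gA gB _ h2 _; simpa using h2
  | cons order rest ih =>
    intro gA gB h1 h2 h3
    simp only [List.foldl_cons]
    -- keys agree
    have hkeys : gA.keys = gB.keys := by
      simp only [PySem.Dict.keys, h2, List.map_map]
      rfl
    have hcont : ∀ k, gA.contains k = gB.contains k := by
      intro k
      rw [PySem.Dict.contains_eq_decide_mem_keys, PySem.Dict.contains_eq_decide_mem_keys, hkeys]
    -- analyse the step
    apply ih
    ·
      -- nodup keys preserved by stepB
      unfold stepB
      cases (PySem.Dict.mk order).get? "PR_MSISDN__c" with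
      | none => exact h1
      | some m =>
        by_cases hm : m = ""
        · simpa [hm] using h1
        · simp only [hm, if_false]
          exact PySem.Dict.nodup_keys_insert _ _ _ h1
    ·
      unfold stepA stepB
      cases (PySem.Dict.mk order).get? "PR_MSISDN__c" with
      | none => exact h2
      | some m =>
        by_cases hm : m = ""
        · simpa [hm] using h2
        · simp only [hm, if_false]
          by_cases hc : gB.contains m = true
          · -- m already present: B appends to the bucket, A compares dates
            have hcA : gA.contains m = false ↔ False := by simp [hcont, hc]
            -- the bucket
            obtain ⟨v, hv⟩ : ∃ v, gB.get? m = some v := by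
              have := PySem.Dict.contains_eq_isSome_get? gB m
              rw [hc] at this
              exact Option.isSome_iff_exists.mp this.symm
            have hmem : (m, v) ∈ gB.items := PySem.Dict.mem_items_of_get?_eq_some _ hv
            have hgBD : gB.getD m [] = v := PySem.Dict.getD_of_get?_eq_some _ _ hv
            have hvne : v ≠ [] := h3 _ hmem
            have hmemA : (m, PySem.List.maxD v bKey []) ∈ gA.items := by
              rw [h2]; exact List.mem_map.mpr ⟨(m, v), hmem, rfl⟩
            have hnodA : gA.keys.Nodup := by rw [hkeys]; exact h1
            have hgAD : gA.getD m [] = PySem.List.maxD v bKey [] :=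
              PySem.Dict.getD_of_mem_items gA hmemA hnodA []
            -- B's new items
            have hBitems : (gB.modify m [] (· ++ [order])).items
                = gB.items.map (fun p => if p.1 == m then (m, v ++ [order]) else p) := by
              unfold PySem.Dict.modify
              rw [hgBD, PySem.Dict.items_insert_of_contains _ _ hc]
            simp only [hcA, if_false, hgAD, hBitems, List.map_map]
            have hbk : ∀ l : List (String × String),
                ((PySem.Dict.mk l).getD "CreatedDate" "" : String) = bKey l := fun _ => rfl
            simp only [hbk]
            by_cases hlt : bKey (PySem.List.maxD v bKey []) < bKey order
            · -- A replaces; both sides update position of key m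
              simp only [hlt, if_true]
              rw [PySem.Dict.items_insert_of_contains _ _ (by rw [hcont]; exact hc), h2, List.map_map]
              apply List.map_congr_left
              intro p _
              by_cases hp : p.1 = m
              · simp [projMax, hp, maxD_snoc bKey v order [] hvne, hlt]
              · simp [projMax, hp]
            · -- A keeps; B's appended bucket has the same max
              simp only [hlt, if_false, h2]
              apply List.map_congr_left
              intro p hp
              by_cases hpk : p.1 = m
              · have hp2 : p.2 = v := by
                  have hmp : (m, p.2) ∈ gB.items := by rw [← hpk]; exact hp
                  exact items_value_unique gB h1 hmp hmem
                simp [projMax, hpk, hp2, maxD_snoc bKey v order [] hvne, hlt]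
              · simp [projMax, hpk]
          · -- fresh key: both append
            have hc' : gB.contains m = false := by simpa using hc
            have hcA : gA.contains m = false := by rw [hcont]; exact hc'
            have hgBD : gB.getD m [] = [] := PySem.Dict.getD_of_not_contains gB [] hc'
            have hBitems : (gB.modify m [] (· ++ [order])).items = gB.items ++ [(m, [order])] := by
              unfold PySem.Dict.modify
              rw [hgBD, PySem.Dict.items_insert_of_not_contains _ _ hc']
              rfl
            simp [hcA, PySem.Dict.items_insert_of_not_contains _ _ hcA, hBitems, h2, projMax, PySem.List.maxD, PySem.List.max?]
    ·
      unfold stepB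
      cases (PySem.Dict.mk order).get? "PR_MSISDN__c" with
      | none => exact h3
      | some m =>
        by_cases hm : m = ""
        · simpa [hm] using h3
        · simp only [hm, if_false]
          intro p hp
          unfold PySem.Dict.modify at hp
          rw [PySem.Dict.items_insert] at hp
          by_cases hc : gB.contains m = true
          · simp only [hc, if_true] at hp
            obtain ⟨q, hq, hqe⟩ := List.mem_map.mp hp
            by_cases hqk : q.1 == m
            · simp only [hqk, if_true] at hqe
              rw [← hqe]; simp
            · simp only [hqk] at hqe
              rw [← hqe]; exact h3 _ hq
          · simp only [hc] at hp
            rcases List.mem_append.mp hp with h | h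
            · exact h3 _ h
            · simp only [List.mem_singleton] at h
              subst h
              simp

-- ===== VERDICT (by name: the statement is the Claim_ definition above) =====
theorem group_by_msisdn_spec : Claim_equal_group_by_msisdn := by
  intro orders _
  unfold Spec_group_by_msisdn group_by_msisdn group_by_msisdn_alt
  exact loop_eq orders PySem.Dict.empty PySem.Dict.empty (by simp) rfl (by simp [PySem.Dict.empty])
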